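-- pv_equiv track=rewrite | github.com/xiuwenz2/SAP-Hypo5 | utils/postprocessing.py | _strip_truncated_tail_by_prefix
-- ===== SOURCE A (Python) =====
-- from typing import List, Tuple, Optional, Dict, Any
--
-- def _strip_truncated_tail_by_prefix(words: List[str], unit: List[str], min_prefix_len: int = 2) -> List[str]:
--     """
--     If the sentence ends with a *prefix* of `unit` and *immediately* before that
--     there is a full occurrence of `unit`, drop the trailing prefix.
--     This avoids keeping an echo-like truncated tail.
--     """
--     n, m = len(words), len(unit)
--     if n == 0 or m == 0:
--         return words
--
--     # Try the longest prefix first down to `min_prefix_len`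
--     for k in range(m - 1, min_prefix_len - 1, -1):
--         if n >= k and words[n - k : n] == unit[:k]:
--             j = n - k
--             # Require a full unit right before the prefix
--             if j - m >= 0 and words[j - m : j] == unit:
--                 return words[:j]
--     return words
-- ===== SOURCE B (Python) =====
-- def _strip_truncated_tail_by_prefix(words, unit, min_prefix_len=2):
--     """KMP: build the prefix function of D = unit + unit, run its automaton over
--     the tail of the sentence; the final state q is the longest t with
--     words[n-t:] == D[:t], and the tail is stripped iff q >= m + min_prefix_len."""
--     n, m = len(words), len(unit)
--     if n == 0 or m == 0:
--         return words
--     D = unit + unit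
--     pi = [0] * (2 * m)
--     q = 0
--     for i in range(1, 2 * m):
--         while q > 0 and D[i] != D[q]:
--             q = pi[q - 1]
--         if D[i] == D[q]:
--             q += 1
--         pi[i] = q
--     t = min(2 * m - 1, n)
--     q = 0
--     for w in words[n - t:]:
--         while q > 0 and w != D[q]:
--             q = pi[q - 1]
--         if w == D[q]:
--             q += 1
--     if q >= m + min_prefix_len:
--         return words[:n - q + m]
--     return words
-- ===== Notes on version B (the rewrite author's own statement) =====
-- stated objective: faster
-- what changed: B replaces A's downward scan of candidate prefix lengths with quadratically many slice comparisons by the KMP prefix-function algorithm: it builds the failure table of the doubled unit, runs the KMP automaton once over the sentence tail, and strips iff the final automaton state reaches m + min_prefix_len.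
import Mathlib
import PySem

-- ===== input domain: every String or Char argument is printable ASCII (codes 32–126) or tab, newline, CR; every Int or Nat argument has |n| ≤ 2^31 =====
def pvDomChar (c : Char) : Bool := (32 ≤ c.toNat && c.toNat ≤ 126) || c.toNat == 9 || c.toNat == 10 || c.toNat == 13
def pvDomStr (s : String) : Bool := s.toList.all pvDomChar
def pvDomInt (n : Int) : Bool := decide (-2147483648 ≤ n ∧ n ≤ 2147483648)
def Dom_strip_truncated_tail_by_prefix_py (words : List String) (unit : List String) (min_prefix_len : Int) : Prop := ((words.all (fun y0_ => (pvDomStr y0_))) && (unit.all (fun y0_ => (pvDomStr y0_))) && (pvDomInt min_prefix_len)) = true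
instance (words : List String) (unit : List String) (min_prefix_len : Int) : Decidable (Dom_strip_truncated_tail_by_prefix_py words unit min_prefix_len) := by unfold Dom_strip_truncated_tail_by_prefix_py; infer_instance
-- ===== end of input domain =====

-- B replaces A's quadratic downward scan of candidate prefix lengths by the KMP prefix-function
-- algorithm on the doubled unit, run once over the sentence tail: same exact result.

-- ===== PORT A =====
-- A's 'for k in range(m-1, min_prefix_len-1, -1)' loop, recursing over the range list
def pvLoopA (words unit : List String) (n m : Int) : List Int → List String
  | [] => words
  | k :: ks =>
    if n ≥ k ∧ PySem.List.slice words (some (n - k)) (some n) = PySem.List.slice unit none (some k) then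
      -- j = n - k
      if (n - k) - m ≥ 0 ∧ PySem.List.slice words (some ((n - k) - m)) (some (n - k)) = unit then
        PySem.List.slice words none (some (n - k))
      else pvLoopA words unit n m ks
    else pvLoopA words unit n m ks

def strip_truncated_tail_by_prefix_py (words : List String) (unit : List String) (min_prefix_len : Int) : List String :=
  let n : Int := words.length
  let m : Int := unit.length
  if n = 0 ∨ m = 0 then words
  else pvLoopA words unit n m (PySem.List.pyRange (m - 1) (min_prefix_len - 1) (-1))

-- ===== PORT B =====
-- B's inner 'while q > 0 and c != D[q]: q = pi[q-1]'; fuel is a termination guard only: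
-- with the prefix table B builds, pi[q-1] < q, so fuel = the entry state always suffices.
def pvSlide (D : List String) (pi : List Nat) (c : String) : Nat → Nat → Nat
  | 0, q => q
  | fuel+1, q =>
    if 0 < q ∧ ¬ c = D.getD q "" then pvSlide D pi c fuel (pi.getD (q-1) 0) else q

-- one KMP automaton step: slide, then 'if c == D[q]: q += 1'
def pvStep (D : List String) (pi : List Nat) (q : Nat) (c : String) : Nat :=
  let r := pvSlide D pi c q q
  if c = D.getD r "" then r + 1 else r

-- body of B's 'for i in range(1, 2*m): ... pi[i] = q'
def pvPiStep (D : List String) (st : List Nat × Nat) (i : Nat) : List Nat × Nat :=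
  let q := pvStep D st.1 st.2 (D.getD i "")
  (st.1 ++ [q], q)

def pvBuildPi (D : List String) : List Nat × Nat :=
  (List.range' 1 (D.length - 1)).foldl (pvPiStep D) ([0], 0)

-- B's 'for w in words[n - t:]' scan
def pvScanQ (D : List String) (pi : List Nat) (tl : List String) : Nat :=
  tl.foldl (fun q w => pvStep D pi q w) 0

def strip_truncated_tail_by_prefix_py_alt (words : List String) (unit : List String) (min_prefix_len : Int) : List String :=
  let n : Int := words.length
  let m : Int := unit.length
  if n = 0 ∨ m = 0 then words
  else
    let D := unit ++ unit
    let pi := (pvBuildPi D).1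
    let t : Int := min (2 * m - 1) n
    let q := pvScanQ D pi (PySem.List.slice words (some (n - t)) none)
    if (q : Int) ≥ m + min_prefix_len then PySem.List.slice words none (some (n - (q : Int) + m))
    else words

-- ===== PRECONDITION & SPEC =====
def Spec_strip_truncated_tail_by_prefix_py (words : List String) (unit : List String) (min_prefix_len : Int) (out : List String) : Prop := out = strip_truncated_tail_by_prefix_py_alt words unit min_prefix_len
instance (words : List String) (unit : List String) (min_prefix_len : Int) (out : List String) : Decidable (Spec_strip_truncated_tail_by_prefix_py words unit min_prefix_len out) := by unfold Spec_strip_truncated_tail_by_prefix_py; infer_instance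

-- ===== CLAIM (what is proved, stated in full; the proofs are below) =====
def Claim_equal_strip_truncated_tail_by_prefix_py : Prop := ∀ (words : List String) (unit : List String) (min_prefix_len : Int), Dom_strip_truncated_tail_by_prefix_py words unit min_prefix_len → Spec_strip_truncated_tail_by_prefix_py words unit min_prefix_len (strip_truncated_tail_by_prefix_py words unit min_prefix_len)

-- ===== LEMMAS AND PROOFS =====

-- ---------- Part 1: integer ranges ----------

theorem pvPyRange_neg_one (a b : Int) :
    PySem.List.pyRange a b (-1) = (List.range (a - b).toNat).map (fun i : Nat => a - (i : Int)) := by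
  simp only [PySem.List.pyRange, if_neg (by decide : ¬((-1:Int) = 0)), if_neg (by decide : ¬((0:Int) < -1))]
  split_ifs with h
  · have e : ((a - b + -(-1) - 1) / -(-1)) = a - b := by norm_num
    rw [e]
    apply List.map_congr_left
    intro i _
    ring
  · have : (a - b).toNat = 0 := by omega
    simp [this]

theorem pvPyRange_neg_one_nil (a b : Int) (h : a ≤ b) : PySem.List.pyRange a b (-1) = [] := by
  rw [pvPyRange_neg_one]
  have : (a - b).toNat = 0 := by omega
  simp [this]

theorem pvPyRange_neg_one_cons (a b : Int) (h : b < a) :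
    PySem.List.pyRange a b (-1) = a :: PySem.List.pyRange (a - 1) b (-1) := by
  rw [pvPyRange_neg_one, pvPyRange_neg_one]
  have h1 : (a - b).toNat = ((a - 1) - b).toNat + 1 := by omega
  rw [h1, List.range_succ_eq_map]
  simp only [List.map_cons, List.map_map, Nat.cast_zero, sub_zero]
  congr 1
  apply List.map_congr_left
  intro i _
  simp only [Function.comp]
  push_cast
  ring

theorem pvMem_pyRange_neg_one_le (a b x : Int) (hx : x ∈ PySem.List.pyRange a b (-1)) : x ≤ a := by
  rw [pvPyRange_neg_one] at hx
  simp only [List.mem_map] at hx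
  obtain ⟨i, _, rfl⟩ := hx
  omega

-- ---------- Part 2: A's loop equals a single descending scan over the doubled unit ----------

-- proof-side abstraction of the fused scan: try t = k+m descending, one slice test per t
def pvScanT (words doubled : List String) (n m : Int) : List Int → List String
  | [] => words
  | t :: ts =>
    if PySem.List.slice words (some (n - t)) none = PySem.List.slice doubled none (some t) then
      PySem.List.slice words none (some (n - t + m))
    else pvScanT words doubled n m ts

-- A skips k when there is no room for a full unit before the k-prefix
theorem pvLoopA_skip_big (words unit : List String) (n m k : Int) (L : List Int)
    (h : n - k - m < 0) : pvLoopA words unit n m (k :: L) = pvLoopA words unit n m L := by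
  simp only [pvLoopA]
  split_ifs with h1 h2
  · omega
  · rfl
  · rfl

-- words[:b] is all of words when length ≤ b
theorem pvSlice_to_all (words : List String) (b : Int) (h : (words.length : Int) ≤ b) :
    PySem.List.slice words none (some b) = words := by
  rw [PySem.List.slice_to words (by omega : (0:Int) ≤ b)]
  exact List.take_of_length_le (by omega)

-- on a range of non-positive k, A only ever returns words unchanged
theorem pvLoopA_ret_words (words unit : List String) (m : Int) (L : List Int)
    (hL : ∀ x ∈ L, x ≤ 0) : pvLoopA words unit (words.length : Int) m L = words := by
  induction L with
  | nil => rfl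
  | cons k ks ih =>
    have hk : k ≤ 0 := hL k (List.mem_cons_self ..)
    simp only [pvLoopA]
    split_ifs with h1 h2
    · exact pvSlice_to_all words _ (by omega)
    · exact ih (fun x hx => hL x (List.mem_cons_of_mem _ hx))
    · exact ih (fun x hx => hL x (List.mem_cons_of_mem _ hx))

-- on a range of t ≤ m, the scan only ever returns words unchanged
theorem pvScanT_ret_words (words doubled : List String) (m : Int) (L : List Int)
    (hL : ∀ x ∈ L, x ≤ m) : pvScanT words doubled (words.length : Int) m L = words := by
  induction L with
  | nil => rfl
  | cons t ts ih =>
    have ht : t ≤ m := hL t (List.mem_cons_self ..)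
    simp only [pvScanT]
    split_ifs with h1
    · exact pvSlice_to_all words _ (by omega)
    · exact ih (fun x hx => hL x (List.mem_cons_of_mem _ hx))

-- decomposition of the doubled-suffix equation into A's two slice equations (Nat level)
theorem pvSplit (words unit : List String) (K : Nat)
    (hN : K + unit.length ≤ words.length) :
    (words.drop (words.length - (K + unit.length)) = List.take (K + unit.length) (unit ++ unit)) ↔
      ((List.take K (words.drop (words.length - K)) = List.take K unit) ∧
       (List.take unit.length (words.drop (words.length - (K + unit.length))) = unit)) := by
  set N := words.length with hNdef
  set M := unit.length with hMdef
  set X := words.drop (N - (K + M)) with hX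
  have hXlen : X.length = K + M := by
    rw [hX, List.length_drop]; omega
  have hdropM : X.drop M = words.drop (N - K) := by
    rw [hX, List.drop_drop]
    congr 1; omega
  have htake : List.take (K + M) (unit ++ unit) = unit ++ List.take K unit := by
    rw [List.take_append]
    congr 1
    · exact List.take_of_length_le (by omega)
    · congr 1; omega
  have htakeK : List.take K (words.drop (N - K)) = words.drop (N - K) := by
    apply List.take_of_length_le
    rw [List.length_drop]; omega
  rw [htake, htakeK]
  constructor
  · intro h
    have h1 : X.take M = unit := by
      rw [hX] at h ⊢
      rw [h]
      rw [List.take_append, List.take_of_length_le (le_refl unit.length), Nat.sub_self, List.take_zero, List.append_nil]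
    have h2 : X.drop M = List.take K unit := by
      rw [hX] at h ⊢
      rw [h, List.drop_append, List.drop_of_length_le (le_refl unit.length), Nat.sub_self, List.drop_zero, List.nil_append]
    constructor
    · rw [← hdropM, h2]
    · exact h1
  · rintro ⟨h1, h2⟩
    have hsplit : X = X.take M ++ X.drop M := (List.take_append_drop M X).symm
    rw [hX] at hsplit h2 ⊢
    rw [hsplit, h2, hdropM, h1]

-- head equivalence: for 0 ≤ k < m with k + m ≤ n, A's two-part test ↔ the doubled-suffix test
theorem pvCond_iff (words unit : List String) (k : Int)
    (hk0 : 0 ≤ k) (hkm : k < (unit.length : Int)) (hkn : k + (unit.length : Int) ≤ (words.length : Int)) :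
    (((words.length : Int) ≥ k ∧
        PySem.List.slice words (some ((words.length : Int) - k)) (some (words.length : Int)) =
          PySem.List.slice unit none (some k)) ∧
      (((words.length : Int) - k) - (unit.length : Int) ≥ 0 ∧
        PySem.List.slice words (some (((words.length : Int) - k) - (unit.length : Int))) (some ((words.length : Int) - k)) = unit)) ↔
    PySem.List.slice words (some ((words.length : Int) - (k + (unit.length : Int)))) none =
      PySem.List.slice (unit ++ unit) none (some (k + (unit.length : Int))) := by
  obtain ⟨K, rfl⟩ : ∃ K : Nat, k = (K : Int) := ⟨k.toNat, (Int.toNat_of_nonneg hk0).symm⟩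
  have hK : K < unit.length := by exact_mod_cast hkm
  have hN : K + unit.length ≤ words.length := by exact_mod_cast hkn
  have e1 : (words.length : Int) - (K : Int) = ((words.length - K : Nat) : Int) := by omega
  have e3 : (K : Int) + (unit.length : Int) = ((K + unit.length : Nat) : Int) := by push_cast; ring
  rw [e1, e3]
  have e2 : ((words.length - K : Nat) : Int) - (unit.length : Int) = ((words.length - (K + unit.length) : Nat) : Int) := by omega
  rw [e2]
  have e4 : (words.length : Int) - ((K + unit.length : Nat) : Int) = ((words.length - (K + unit.length) : Nat) : Int) := by omega
  rw [e4]
  rw [PySem.List.slice_natCast, PySem.List.slice_natCast, PySem.List.slice_to_natCast,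
    PySem.List.slice_from_natCast, PySem.List.slice_to_natCast]
  have f1 : words.length - (words.length - K) = K := by omega
  have f2 : (words.length - K) - (words.length - (K + unit.length)) = unit.length := by omega
  rw [f1, f2]
  have hs := pvSplit words unit K hN
  constructor
  · rintro ⟨⟨-, h1⟩, ⟨-, h2⟩⟩
    exact hs.mpr ⟨h1, h2⟩
  · intro h
    obtain ⟨h1, h2⟩ := hs.mp h
    refine ⟨⟨by exact_mod_cast (by omega : K ≤ words.length), h1⟩, ⟨by positivity, h2⟩⟩

-- the shared descent: A from k, the scan from min(k+m, n), both down to the same (shifted) stop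
theorem pvMain (words unit : List String) (k s : Int)
    (hk : k ≤ (unit.length : Int) - 1) :
    pvLoopA words unit (words.length : Int) (unit.length : Int) (PySem.List.pyRange k s (-1)) =
      pvScanT words (unit ++ unit) (words.length : Int) (unit.length : Int)
        (PySem.List.pyRange (min (k + (unit.length : Int)) (words.length : Int)) (s + (unit.length : Int)) (-1)) := by
  set n : Int := (words.length : Int) with hn
  set m : Int := (unit.length : Int) with hm
  obtain ⟨d, hd⟩ : ∃ d : Nat, (k - s).toNat = d := ⟨_, rfl⟩
  induction d generalizing k with
  | zero =>
    rw [pvPyRange_neg_one_nil k s (by omega), pvPyRange_neg_one_nil _ _ (by omega)]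
    rfl
  | succ d ih =>
    have hsk : s < k := by omega
    rw [pvPyRange_neg_one_cons k s hsk]
    by_cases hbig : n < k + m
    · -- no room for a full unit before the prefix: A skips k, the scan's range is unchanged
      rw [pvLoopA_skip_big words unit n m k _ (by omega)]
      have hmin : min (k + m) n = min ((k - 1) + m) n := by
        rw [min_eq_right (by omega : n ≤ k + m), min_eq_right (by omega : n ≤ (k - 1) + m)]
      rw [hmin]
      exact ih (k - 1) (by omega) (by omega)
    · -- k + m ≤ n : the scan's range head is k + m
      have hmin : min (k + m) n = k + m := min_eq_left (by omega)
      rw [hmin, pvPyRange_neg_one_cons (k + m) (s + m) (by omega)]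
      by_cases hk0 : 0 ≤ k
      · -- aligned heads: conditions are equivalent, return values equal
        have hiff := pvCond_iff words unit k hk0 (by omega) (by omega)
        simp only [pvLoopA, pvScanT]
        rw [← hn, ← hm] at hiff
        by_cases hc : PySem.List.slice words (some (n - (k + m))) none =
            PySem.List.slice (unit ++ unit) none (some (k + m))
        · obtain ⟨⟨h1, h2⟩, ⟨h3, h4⟩⟩ := hiff.mpr hc
          rw [if_pos ⟨h1, h2⟩, if_pos ⟨h3, h4⟩, if_pos hc]
          have e5 : n - (k + m) + m = n - k := by ring
          rw [e5]
        · have hA : ¬ ((n ≥ k ∧ PySem.List.slice words (some (n - k)) (some n) = PySem.List.slice unit none (some k)) ∧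
              ((n - k) - m ≥ 0 ∧ PySem.List.slice words (some ((n - k) - m)) (some (n - k)) = unit)) :=
            fun hcc => hc (hiff.mp hcc)
          rw [if_neg hc]
          have hrest : min ((k - 1) + m) n = (k - 1) + m := min_eq_left (by omega)
          have htail := ih (k - 1) (by omega) (by omega)
          rw [hrest] at htail
          have e : k + m - 1 = (k - 1) + m := by ring
          rw [e, ← htail]
          by_cases hc1 : n ≥ k ∧ PySem.List.slice words (some (n - k)) (some n) = PySem.List.slice unit none (some k)
          · rw [if_pos hc1, if_neg (fun hc2 => hA ⟨hc1, hc2⟩)]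
          · rw [if_neg hc1]
      · -- k < 0 : both sides can only return words unchanged
        rw [not_le] at hk0
        rw [pvLoopA_ret_words words unit m _ ?hA, pvScanT_ret_words words (unit ++ unit) m _ ?hB]
        case hA =>
          intro x hx
          rcases List.mem_cons.mp hx with rfl | hx'
          · omega
          · have := pvMem_pyRange_neg_one_le _ _ _ hx'
            omega
        case hB =>
          intro x hx
          rcases List.mem_cons.mp hx with rfl | hx'
          · omega
          · have := pvMem_pyRange_neg_one_le _ _ _ hx'
            omega

-- ---------- Part 3: borders and the prefix function ----------

-- a prefix of D that is a suffix of u is no longer than u (when u is shorter than D)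
theorem pvTake_suffix_le (D u : List String) (t : Nat) (hu : u.length < D.length)
    (h : D.take t <:+ u) : t ≤ u.length := by
  have hl := h.length_le
  simp only [List.length_take] at hl
  omega

-- of two prefixes of D that are suffixes of u, the shorter is a suffix of the longer
theorem pvSuffix_suffix (D u : List String) (s t : Nat) (hst : s ≤ t)
    (hs : D.take s <:+ u) (ht : D.take t <:+ u) : D.take s <:+ D.take t :=
  List.suffix_of_suffix_length_le hs ht (by simp only [List.length_take]; omega)

-- xs ++ [a] is a suffix of u ++ [c] iff xs is a suffix of u and a = c
theorem pvConcat_suffix (xs u : List String) (a c : String) :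
    xs ++ [a] <:+ u ++ [c] ↔ xs <:+ u ∧ a = c := by
  rw [← List.reverse_prefix, ← List.reverse_prefix (l₁ := xs)]
  simp only [List.reverse_append, List.reverse_singleton, List.singleton_append,
    List.cons_prefix_cons]
  exact and_comm

-- peeling the last element off a prefix of D
theorem pvTake_concat (D : List String) (t : Nat) (h1 : 1 ≤ t) (h2 : t ≤ D.length) :
    D.take t = D.take (t-1) ++ [D.getD (t-1) ""] := by
  obtain ⟨s, rfl⟩ : ∃ s, t = s + 1 := ⟨t - 1, by omega⟩
  have ht : s < D.length := by omega
  simp only [Nat.add_sub_cancel]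
  rw [List.getD_eq_getElem D "" ht, List.take_add_one, List.getElem?_eq_getElem ht]
  rfl

-- the prefix table is correct up to index N: pi[i] is the longest proper border of D[:i+1]
def pvGood (D : List String) (pi : List Nat) (N : Nat) : Prop :=
  ∀ i, i < N → pi.getD i 0 = Nat.findGreatest (fun t => D.take t <:+ D.take (i+1)) i

-- the longest prefix of D that is a suffix of u
def pvPhi (D u : List String) : Nat := Nat.findGreatest (fun t => D.take t <:+ u) u.length

theorem pvFindGreatest_le_of {P : Nat → Prop} [DecidablePred P] {n m : Nat}
    (h : ∀ k, k ≤ n → P k → k ≤ m) : Nat.findGreatest P n ≤ m := by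
  rcases Nat.eq_zero_or_pos (Nat.findGreatest P n) with h0 | h0
  · omega
  · exact h _ (Nat.findGreatest_le n) (Nat.findGreatest_of_ne_zero rfl (by omega))

theorem pvPhi_suffix (D u : List String) : D.take (pvPhi D u) <:+ u := by
  unfold pvPhi
  rcases Nat.eq_zero_or_pos (Nat.findGreatest (fun t => D.take t <:+ u) u.length) with h | h
  · simp [h]
  · exact Nat.findGreatest_of_ne_zero rfl h.ne'

theorem pvLe_phi (D u : List String) (t : Nat) (hu : u.length < D.length)
    (h : D.take t <:+ u) : t ≤ pvPhi D u :=
  Nat.le_findGreatest (pvTake_suffix_le D u t hu h) h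

-- the slide finds the longest border of u (below bd) whose next pattern element is c
theorem pvSlide_spec (D : List String) (pi : List Nat) (c : String) (u : List String) (bd : Nat)
    (hGood : pvGood D pi bd) (hbd : bd < D.length) :
    ∀ fuel q₀, q₀ ≤ fuel → q₀ ≤ bd → D.take q₀ <:+ u →
      (∀ b, b ≤ bd → D.take b <:+ u → D.getD b "" = c → b ≤ q₀) →
      (pvSlide D pi c fuel q₀ ≤ q₀ ∧ D.take (pvSlide D pi c fuel q₀) <:+ u ∧
        (pvSlide D pi c fuel q₀ = 0 ∨ D.getD (pvSlide D pi c fuel q₀) "" = c) ∧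
        ∀ b, b ≤ bd → D.take b <:+ u → D.getD b "" = c → b ≤ pvSlide D pi c fuel q₀) := by
  intro fuel
  induction fuel with
  | zero =>
    intro q₀ hf hqb hqs hmax
    have h0 : q₀ = 0 := by omega
    subst h0
    exact ⟨le_rfl, hqs, Or.inl rfl, hmax⟩
  | succ fuel ih =>
    intro q₀ hf hqb hqs hmax
    by_cases hcond : 0 < q₀ ∧ ¬ c = D.getD q₀ ""
    · rw [pvSlide, if_pos hcond]
      have hgood := hGood (q₀ - 1) (by omega)
      have hq0e : q₀ - 1 + 1 = q₀ := by omega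
      rw [hq0e] at hgood
      have hq₁le : pi.getD (q₀ - 1) 0 ≤ q₀ - 1 := by rw [hgood]; exact Nat.findGreatest_le _
      have hq₁s : D.take (pi.getD (q₀ - 1) 0) <:+ u := by
        rcases Nat.eq_zero_or_pos (pi.getD (q₀ - 1) 0) with h0 | h0
        · rw [h0]; simp
        · have hb : D.take (pi.getD (q₀ - 1) 0) <:+ D.take q₀ := by
            rw [hgood] at h0 ⊢
            exact Nat.findGreatest_of_ne_zero rfl h0.ne'
          exact hb.trans hqs
      have hmax' : ∀ b, b ≤ bd → D.take b <:+ u → D.getD b "" = c → b ≤ pi.getD (q₀ - 1) 0 := by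
        intro b hb hbs hbc
        have hbq : b ≤ q₀ := hmax b hb hbs hbc
        have hbne : b ≠ q₀ := by rintro rfl; exact hcond.2 hbc.symm
        have hsu : D.take b <:+ D.take q₀ := pvSuffix_suffix D u b q₀ (by omega) hbs hqs
        rw [hgood]
        exact Nat.le_findGreatest (by omega) hsu
      have hfuel : pi.getD (q₀ - 1) 0 ≤ fuel := by omega
      have hbd' : pi.getD (q₀ - 1) 0 ≤ bd := by omega
      obtain ⟨h1, h2, h3, h4⟩ := ih (pi.getD (q₀ - 1) 0) hfuel hbd' hq₁s hmax'
      exact ⟨h1.trans (by omega), h2, h3, h4⟩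
    · rw [pvSlide, if_neg hcond]
      refine ⟨le_rfl, hqs, ?_, hmax⟩
      by_cases h0 : q₀ = 0
      · exact Or.inl h0
      · push_neg at hcond
        exact Or.inr (hcond (by omega)).symm

-- one automaton step computes the longest prefix of D (of length ≤ bd+1) suffixing u ++ [c]
theorem pvStep_spec (D : List String) (pi : List Nat) (u : List String) (c : String) (bd q₀ : Nat)
    (hGood : pvGood D pi bd) (hbd : bd + 1 ≤ D.length) (hq0 : q₀ ≤ bd) (hqs : D.take q₀ <:+ u)
    (hmax : ∀ b, b ≤ bd → D.take b <:+ u → D.getD b "" = c → b ≤ q₀) :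
    pvStep D pi q₀ c = Nat.findGreatest (fun t => D.take t <:+ u ++ [c]) (bd + 1) := by
  obtain ⟨hr1, hr2, hr3, hr4⟩ :=
    pvSlide_spec D pi c u bd hGood (by omega) q₀ q₀ le_rfl hq0 hqs hmax
  unfold pvStep
  set r := pvSlide D pi c q₀ q₀ with hrdef
  by_cases hc : c = D.getD r ""
  · rw [if_pos hc]
    apply le_antisymm
    · apply Nat.le_findGreatest (by omega)
      rw [pvTake_concat D (r+1) (by omega) (by omega)]
      simp only [Nat.add_sub_cancel]
      exact (pvConcat_suffix _ _ _ _).2 ⟨hr2, hc.symm⟩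
    · apply pvFindGreatest_le_of
      intro t ht hP
      rcases Nat.eq_zero_or_pos t with rfl | htpos
      · omega
      · rw [pvTake_concat D t (by omega) (by omega)] at hP
        obtain ⟨h1, h2⟩ := (pvConcat_suffix _ _ _ _).1 hP
        have := hr4 (t-1) (by omega) h1 h2
        omega
  · rw [if_neg hc]
    have hr0 : r = 0 := by
      rcases hr3 with h | h
      · exact h
      · exact absurd h.symm hc
    rw [hr0]
    symm
    rw [Nat.findGreatest_eq_zero_iff]
    intro t ht0 htb hP
    rw [pvTake_concat D t (by omega) (by omega)] at hP
    obtain ⟨h1, h2⟩ := (pvConcat_suffix _ _ _ _).1 hP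
    have hle := hr4 (t-1) (by omega) h1 h2
    rw [hr0] at hle
    have ht1 : t = 1 := by omega
    subst ht1
    rw [hr0] at hc
    exact hc h2.symm

-- the table builder maintains correctness and length at every step
theorem pvBuild_aux (D : List String) :
    ∀ k, k ≤ D.length - 1 →
      ((List.range' 1 k).foldl (pvPiStep D) ([0], 0)).1.length = k + 1 ∧
      pvGood D ((List.range' 1 k).foldl (pvPiStep D) ([0], 0)).1 (k+1) ∧
      ((List.range' 1 k).foldl (pvPiStep D) ([0], 0)).2 =
        Nat.findGreatest (fun t => D.take t <:+ D.take (k+1)) k := by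
  intro k
  induction k with
  | zero =>
    intro _
    refine ⟨rfl, ?_, rfl⟩
    intro i hi
    have : i = 0 := by omega
    subst this
    rfl
  | succ k ih =>
    intro hk
    obtain ⟨hlen, hgood, hq⟩ := ih (by omega)
    rw [List.range'_1_concat, List.foldl_append, List.foldl_cons, List.foldl_nil]
    set st := (List.range' 1 k).foldl (pvPiStep D) ([0], 0) with hst
    have hidx : 1 + k = k + 1 := by omega
    rw [hidx]
    have hqs : D.take st.2 <:+ D.take (k+1) := by
      rcases Nat.eq_zero_or_pos st.2 with h0 | h0
      · rw [h0]; simp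
      · rw [hq] at h0 ⊢
        exact Nat.findGreatest_of_ne_zero rfl h0.ne'
    have hmax : ∀ b, b ≤ k → D.take b <:+ D.take (k+1) →
        D.getD b "" = D.getD (k+1) "" → b ≤ st.2 := by
      intro b hb hbs _
      rw [hq]
      exact Nat.le_findGreatest hb hbs
    have hstep := pvStep_spec D st.1 (D.take (k+1)) (D.getD (k+1) "") k st.2
      (fun i hi => hgood i (by omega)) (by omega) (hq ▸ Nat.findGreatest_le k) hqs hmax
    have hcat : D.take (k+1) ++ [D.getD (k+1) ""] = D.take (k+2) :=
      (pvTake_concat D (k+2) (by omega) (by omega)).symm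
    rw [hcat] at hstep
    simp only [pvPiStep]
    refine ⟨?_, ?_, ?_⟩
    · simp [hlen]
    · intro i hi
      by_cases hik : i < k + 1
      · rw [List.getD_append _ _ _ _ (by omega)]
        exact hgood i hik
      · have hieq : i = k + 1 := by omega
        subst hieq
        have : (st.1 ++ [pvStep D st.1 st.2 (D.getD (k+1) "")]).getD (k+1) 0 =
            pvStep D st.1 st.2 (D.getD (k+1) "") := by
          simp [List.getD, hlen]
        rw [this, hstep]
    · rw [hstep]

theorem pvBuildPi_good (D : List String) (hD : 1 ≤ D.length) :
    pvGood D (pvBuildPi D).1 D.length := by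
  obtain ⟨hlen, hgood, -⟩ := pvBuild_aux D (D.length - 1) le_rfl
  intro i hi
  exact hgood i (by omega)

-- the automaton scan over a text shorter than D ends in state pvPhi D text
theorem pvScanQ_spec (D : List String) (pi : List Nat) (hGood : pvGood D pi D.length) :
    ∀ u : List String, u.length < D.length → pvScanQ D pi u = pvPhi D u := by
  intro u
  induction u using List.reverseRecOn with
  | nil => intro _; rfl
  | append_singleton u c ih =>
    intro hlen
    have hu : u.length < D.length := by simp at hlen; omega
    unfold pvScanQ at ih ⊢
    rw [List.foldl_append, List.foldl_cons, List.foldl_nil, ih hu]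
    have hmax : ∀ b, b ≤ u.length → D.take b <:+ u → D.getD b "" = c → b ≤ pvPhi D u := by
      intro b hb hbs _
      exact Nat.le_findGreatest hb hbs
    have hstep := pvStep_spec D pi u c u.length (pvPhi D u)
      (fun i hi => hGood i (by omega)) (by simp at hlen; omega)
      (Nat.findGreatest_le _) (pvPhi_suffix D u) hmax
    rw [hstep]
    unfold pvPhi
    congr 1
    simp

-- ---------- Part 4: the descending scan equals the closed form by pvPhi ----------

-- slice equality at offset t is exactly "D[:t] is a suffix of words"
theorem pvMatch_iff (words D : List String) (t : Int) (ht0 : 0 ≤ t)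
    (htn : t ≤ (words.length : Int)) (htd : t ≤ (D.length : Int)) :
    (PySem.List.slice words (some ((words.length : Int) - t)) none =
      PySem.List.slice D none (some t)) ↔ D.take t.toNat <:+ words := by
  rw [PySem.List.slice_from _ (by omega), PySem.List.slice_to _ ht0]
  constructor
  · intro h
    rw [← h]
    exact List.drop_suffix _ _
  · intro h
    obtain ⟨s, hs⟩ := h
    have hlt : (D.take t.toNat).length = t.toNat := by
      simp only [List.length_take]
      omega
    have hns : ((words.length : Int) - t).toNat = s.length := by
      have hc := congrArg List.length hs
      simp only [List.length_append] at hc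
      omega
    rw [hns, ← hs, List.drop_left]

theorem pvScanT_no (words D : List String) (n m e : Int) :
    ∀ c : Int,
      (∀ t, e < t → t ≤ c →
        PySem.List.slice words (some (n - t)) none ≠ PySem.List.slice D none (some t)) →
      pvScanT words D n m (PySem.List.pyRange c e (-1)) = words := by
  intro c
  obtain ⟨d, hd⟩ : ∃ d : Nat, (c - e).toNat = d := ⟨_, rfl⟩
  induction d generalizing c with
  | zero =>
    intro _
    rw [pvPyRange_neg_one_nil c e (by omega)]
    rfl
  | succ d ih =>
    intro hno
    rw [pvPyRange_neg_one_cons c e (by omega)]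
    simp only [pvScanT]
    rw [if_neg (hno c (by omega) le_rfl)]
    exact ih (c-1) (by omega) (fun t h1 h2 => hno t h1 (by omega))

theorem pvScanT_hit (words D : List String) (n m e q : Int)
    (hmatch : PySem.List.slice words (some (n - q)) none = PySem.List.slice D none (some q))
    (hq1 : e < q) :
    ∀ c : Int, q ≤ c →
      (∀ t, q < t → t ≤ c →
        PySem.List.slice words (some (n - t)) none ≠ PySem.List.slice D none (some t)) →
      pvScanT words D n m (PySem.List.pyRange c e (-1)) =
        PySem.List.slice words none (some (n - q + m)) := by
  intro c
  obtain ⟨d, hd⟩ : ∃ d : Nat, (c - q).toNat = d := ⟨_, rfl⟩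
  induction d generalizing c with
  | zero =>
    intro hqc _
    have hcq : c = q := by omega
    subst hcq
    rw [pvPyRange_neg_one_cons c e hq1]
    simp only [pvScanT]
    rw [if_pos hmatch]
  | succ d ih =>
    intro hqc hno
    rw [pvPyRange_neg_one_cons c e (by omega)]
    simp only [pvScanT]
    rw [if_neg (hno c (by omega) le_rfl)]
    exact ih (c-1) (by omega) (by omega) (fun t h1 h2 => hno t h1 (by omega))

-- a prefix of D suffixes words iff it suffixes the length-T tail of words (lengths ≤ T)
theorem pvTail_iff (words D : List String) (T t : Nat) (hT : T ≤ words.length) (ht : t ≤ T) :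
    (D.take t <:+ words ↔ D.take t <:+ words.drop (words.length - T)) := by
  constructor
  · intro h
    refine List.suffix_of_suffix_length_le h (List.drop_suffix _ _) ?_
    simp only [List.length_take, List.length_drop]
    omega
  · intro h
    exact h.trans (List.drop_suffix _ _)

-- ===== VERDICT (by name: the statement is the Claim_ definition above) =====
theorem strip_truncated_tail_by_prefix_py_spec : Claim_equal_strip_truncated_tail_by_prefix_py := by
  intro words unit mpl _
  unfold Spec_strip_truncated_tail_by_prefix_py
  simp only [strip_truncated_tail_by_prefix_py, strip_truncated_tail_by_prefix_py_alt]
  by_cases h : (words.length : Int) = 0 ∨ ((unit.length : Int) = 0)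
  · rw [if_pos h, if_pos h]
  · rw [if_neg h, if_neg h]
    push_neg at h
    set n : Int := (words.length : Int) with hn
    set m : Int := (unit.length : Int) with hm
    have hm1 : 1 ≤ unit.length := by
      rcases Nat.eq_zero_or_pos unit.length with h0 | h0
      · exact absurd (by simp [hm, h0]) h.2
      · omega
    have hn1 : 1 ≤ words.length := by
      rcases Nat.eq_zero_or_pos words.length with h0 | h0
      · exact absurd (by simp [hn, h0]) h.1
      · omega
    set D := unit ++ unit with hD
    have hDlen : D.length = 2 * unit.length := by simp [hD]; omega
    set T : Int := min (2 * m - 1) n with hT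
    have hT1 : 1 ≤ T := by simp [hT, hm, hn]; omega
    have hTn : T ≤ n := by simp [hT]
    have hTd : T ≤ 2 * m - 1 := by simp [hT]
    set T' : Nat := T.toNat with hT'
    have hT'c : (T' : Int) = T := by simp [hT']; omega
    -- the tail the automaton scans
    have htail : PySem.List.slice words (some (n - T)) none = words.drop (words.length - T') := by
      rw [PySem.List.slice_from _ (by omega)]
      congr 1
      omega
    set tl : List String := words.drop (words.length - T') with htl
    have htllen : tl.length = T' := by
      rw [htl, List.length_drop]
      omega
    have htlD : tl.length < D.length := by
      rw [htllen, hDlen]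
      omega
    -- the automaton state is pvPhi D tl
    have hq : pvScanQ D (pvBuildPi D).1 (PySem.List.slice words (some (n - T)) none) = pvPhi D tl := by
      rw [htail]
      exact pvScanQ_spec D _ (pvBuildPi_good D (by omega)) tl htlD
    have hq'T : pvPhi D tl ≤ T' := by
      rw [← htllen]
      exact Nat.findGreatest_le _
    -- A's side: pvMain turns the k-loop into the fused descending scan
    have hmain := pvMain words unit (m - 1) (mpl - 1) (by rw [hm])
    have harg : PySem.List.pyRange (min ((m - 1) + m) n) ((mpl - 1) + m) (-1) =
        PySem.List.pyRange T (m + mpl - 1) (-1) := by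
      rw [hT]
      congr 1
      · congr 1
        omega
      · omega
    rw [← hn, ← hm, ← hD] at hmain
    rw [harg] at hmain
    rw [hmain, hq]
    set q' : Nat := pvPhi D tl with hq'
    by_cases hcase : (q' : Int) ≥ m + mpl
    · rw [if_pos hcase]
      -- the scan hits exactly at t = q'
      have hq'd : (q' : Int) ≤ (D.length : Int) := by rw [hDlen]; push_cast; omega
      have hmatch : PySem.List.slice words (some (n - (q' : Int))) none =
          PySem.List.slice D none (some (q' : Int)) := by
        rw [hn, pvMatch_iff words D (q' : Int) (by omega) (by rw [← hn]; omega) hq'd]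
        simp only [Int.toNat_natCast]
        have hs : D.take q' <:+ tl := by rw [hq']; exact pvPhi_suffix D tl
        exact hs.trans (by rw [htl]; exact List.drop_suffix _ _)
      have hno : ∀ t, (q' : Int) < t → t ≤ T →
          PySem.List.slice words (some (n - t)) none ≠ PySem.List.slice D none (some t) := by
        intro t h1 h2 hmm
        rw [hn, pvMatch_iff words D t (by omega) (by rw [← hn]; omega)
          (by rw [hDlen]; push_cast; omega)] at hmm
        have htT : t.toNat ≤ T' := by omega
        rw [pvTail_iff words D T' t.toNat (by omega) htT] at hmm
        have hle : t.toNat ≤ q' := by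
          rw [hq']
          exact pvLe_phi D tl t.toNat htlD (by rw [htl]; exact hmm)
        omega
      exact pvScanT_hit words D n m (m + mpl - 1) (q' : Int) hmatch (by omega) T (by
        have : (q' : Int) ≤ (T' : Int) := by exact_mod_cast hq'T
        omega) hno
    · rw [if_neg hcase]
      -- no t in the scanned range matches
      apply pvScanT_no
      intro t h1 h2 hmm
      have ht0 : 0 < t := by omega
      rw [hn, pvMatch_iff words D t (by omega) (by rw [← hn]; omega)
        (by rw [hDlen]; push_cast; omega)] at hmm
      have htT : t.toNat ≤ T' := by omega
      rw [pvTail_iff words D T' t.toNat (by omega) htT] at hmm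
      have hle : t.toNat ≤ q' := by
        rw [hq']
        exact pvLe_phi D tl t.toNat htlD (by rw [htl]; exact hmm)
      omega
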